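-- pv_equiv track=rewrite | github.com/diegorodriguezv/pythonchallenge | level_32/csp_tester.py | encode_row
-- ===== SOURCE A (Python) =====
-- def encode_row(bits):
--     lengths_of_1 = []
--     prev = False
--     current_length = 0
--     for bit in bits:
--         if bit:
--             current_length += 1
--         else:
--             if prev:
--                 lengths_of_1.append(current_length)
--                 current_length = 0
--         prev = bit
--     if current_length > 0:
--         lengths_of_1.append(current_length)
--     return lengths_of_1
-- ===== SOURCE B (Python) =====
-- from itertools import groupby
--
--
-- def encode_row(bits):
--     return [sum(1 for _ in g) for k, g in groupby(bits, key=bool) if k]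
-- ===== Notes on version B (the rewrite author's own statement) =====
-- stated objective: idiomatic
-- what changed: Replaces the imperative single pass maintaining prev/current_length with itertools.groupby partitioning the bits into maximal runs of equal truthiness, then a comprehension that counts each True group.
import Mathlib
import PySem

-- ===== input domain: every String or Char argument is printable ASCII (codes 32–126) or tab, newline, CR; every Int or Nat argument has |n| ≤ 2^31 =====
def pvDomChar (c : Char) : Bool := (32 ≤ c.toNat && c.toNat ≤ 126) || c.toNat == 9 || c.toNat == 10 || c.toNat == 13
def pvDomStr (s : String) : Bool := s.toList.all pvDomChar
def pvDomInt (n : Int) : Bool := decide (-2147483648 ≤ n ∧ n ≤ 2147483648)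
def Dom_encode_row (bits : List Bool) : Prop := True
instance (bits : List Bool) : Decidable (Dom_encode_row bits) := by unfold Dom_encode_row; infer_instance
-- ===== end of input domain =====

-- B replaces A's imperative prev/current_length pass by grouping the bits into maximal runs and counting the True runs (idiomatic groupby decomposition).

-- ===== PORT A =====
-- loop state: (lengths_of_1, prev, current_length)
def encodeRowStep (st : List Int × Bool × Int) (bit : Bool) : List Int × Bool × Int :=
  if bit then (st.1, bit, st.2.2 + 1)
  else if st.2.1 then (st.1 ++ [st.2.2], bit, 0)
  else (st.1, bit, st.2.2)

def encode_row (bits : List Bool) : List Int :=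
  let s := bits.foldl encodeRowStep ([], false, 0)
  if s.2.2 > 0 then s.1 ++ [s.2.2] else s.1

-- ===== PORT B =====
-- groupby(bits, key=bool): peel off one maximal run of equal truthiness at a time;
-- for a True-key group emit its count (sum of 1 per element), otherwise skip it.
def encodeRowGroups : List Bool → List Int
  | [] => []
  | b :: rest =>
    let run := rest.takeWhile (· == b)
    let rest' := rest.dropWhile (· == b)
    if b then ((1 : Int) + run.length) :: encodeRowGroups rest'
    else encodeRowGroups rest'
termination_by l => l.length
decreasing_by
  · simpa using Nat.lt_succ_of_le (List.length_dropWhile_le _ _)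
  · simpa using Nat.lt_succ_of_le (List.length_dropWhile_le _ _)

def encode_row_alt (bits : List Bool) : List Int := encodeRowGroups bits

-- ===== PRECONDITION & SPEC =====
def Spec_encode_row (bits : List Bool) (out : List Int) : Prop := out = encode_row_alt bits
instance (bits : List Bool) (out : List Int) : Decidable (Spec_encode_row bits out) := by unfold Spec_encode_row; infer_instance

-- ===== CLAIM (what is proved, stated in full; the proofs are below) =====
def Claim_equal_encode_row : Prop := ∀ (bits : List Bool), Dom_encode_row bits → Spec_encode_row bits (encode_row bits)

-- ===== LEMMAS AND PROOFS =====

def encodeRowFinish (s : List Int × Bool × Int) : List Int :=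
  if s.2.2 > 0 then s.1 ++ [s.2.2] else s.1

-- encodeRowGroups ignores a leading false (it only skips over the false run)
theorem encodeRowGroups_false_cons (l : List Bool) :
    encodeRowGroups (false :: l) = encodeRowGroups l := by
  have h : ∀ m : List Bool, encodeRowGroups (m.dropWhile (· == false)) = encodeRowGroups m := by
    intro m
    induction m with
    | nil => rfl
    | cons b rest ih =>
      cases b with
      | false => simpa [List.dropWhile, encodeRowGroups] using ih
      | true => simp [List.dropWhile]
  simpa [encodeRowGroups] using h l

-- the joint loop invariant: from a false/0 state the loop computes the groups of the
-- remaining bits; from a true/cur state it first finishes the current run of trues.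
theorem encodeRow_loop_inv (bits : List Bool) :
    (∀ acc : List Int,
      encodeRowFinish (bits.foldl encodeRowStep (acc, false, 0)) = acc ++ encodeRowGroups bits) ∧
    (∀ (acc : List Int) (cur : Int), 0 < cur →
      encodeRowFinish (bits.foldl encodeRowStep (acc, true, cur)) =
        acc ++ ((cur + (bits.takeWhile (· == true)).length) :: encodeRowGroups (bits.dropWhile (· == true)))) := by
  induction bits with
  | nil =>
    constructor
    · intro acc; simp [encodeRowFinish, encodeRowGroups]
    · intro acc cur hcur; simp [encodeRowFinish, encodeRowGroups, hcur]
  | cons b rest ih =>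
    obtain ⟨ih1, ih2⟩ := ih
    constructor
    · intro acc
      cases b with
      | false =>
        simp only [List.foldl_cons, encodeRowStep]
        simpa [encodeRowGroups_false_cons] using ih1 acc
      | true =>
        simp only [List.foldl_cons, encodeRowStep]
        have := ih2 acc 1 (by norm_num)
        simp [this, encodeRowGroups]
    · intro acc cur hcur
      cases b with
      | false =>
        simp only [List.foldl_cons, encodeRowStep]
        have h1 := ih1 (acc ++ [cur])
        simp [h1, List.takeWhile, List.dropWhile, encodeRowGroups_false_cons]
      | true =>
        simp only [List.foldl_cons, encodeRowStep]
        have h2 := ih2 acc (cur + 1) (by omega)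
        simp [h2, List.takeWhile, List.dropWhile]
        ring_nf

-- ===== VERDICT (by name: the statement is the Claim_ definition above) =====
theorem encode_row_spec : Claim_equal_encode_row := by
  intro bits _
  unfold Spec_encode_row encode_row encode_row_alt
  simpa [encodeRowFinish] using (encodeRow_loop_inv bits).1 []
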